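-- pv_equiv track=rewrite | github.com/avilamicael/monitoramento_firmasolar | backend_monitoramento/provedores/foxess/catalogo_falhas.py | interpretar
-- ===== SOURCE A (Python) =====
-- CATALOGO_Q: dict[str, tuple[str, str, str]] = {
--     # ── PV1..PV4 ─ cada canal tem 4 códigos (short, low V, over V, over I) ───
--     '4029': ('PV1 curto-circuito interno',  'critico',    'equipamento'),
--     '4030': ('PV1 tensão de entrada baixa', 'aviso',      'equipamento'),
--     '4031': ('PV1 sobretensão',             'aviso',      'equipamento'),
--     '4032': ('PV1 sobrecorrente',           'aviso',      'equipamento'),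
--
--     '4061': ('PV2 curto-circuito interno',  'critico',    'equipamento'),
--     '4062': ('PV2 tensão de entrada baixa', 'aviso',      'equipamento'),
--     '4063': ('PV2 sobretensão',             'aviso',      'equipamento'),
--     '4064': ('PV2 sobrecorrente',           'aviso',      'equipamento'),
--
--     '4093': ('PV3 curto-circuito interno',  'critico',    'equipamento'),
--     '4094': ('PV3 tensão de entrada baixa', 'aviso',      'equipamento'),
--     '4095': ('PV3 sobretensão',             'aviso',      'equipamento'),
--     '4096': ('PV3 sobrecorrente',           'aviso',      'equipamento'),
--
--     '4125': ('PV4 curto-circuito interno',  'critico',    'equipamento'),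
--     '4126': ('PV4 tensão de entrada baixa', 'aviso',      'equipamento'),
--     '4127': ('PV4 sobretensão',             'aviso',      'equipamento'),
--     '4128': ('PV4 sobrecorrente',           'aviso',      'equipamento'),
--
--     # ── Falhas AC / rede ────────────────────────────────────────────────────
--     '4147': ('Ponte do inversor assimétrica',     'critico',    'equipamento'),
--     '4148': ('Tensão desigual nos polos do relé', 'critico',    'equipamento'),
--     '4149': ('Ride-through de alta/baixa tensão', 'aviso',      'rede_eletrica'),
--     '4150': ('Desligamento remoto',               'importante', 'sistema_desligado'),
--     '4151': ('Perda de AC (rede ausente)',        'aviso',      'rede_eletrica'),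
--     '4152': ('Sobretensão do barramento BUS',     'importante', 'rede_eletrica'),
--     '4153': ('Falha de aterramento (GFDI)',       'critico',    'equipamento'),
--     '4154': ('Temperatura AC baixa',              'aviso',      'equipamento'),
--     '4155': ('Temperatura AC alta',               'importante', 'equipamento'),
--     '4156': ('Frequência AC abaixo do limite',    'aviso',      'rede_eletrica'),
--     '4157': ('Frequência AC acima do limite',     'aviso',      'rede_eletrica'),
--     '4158': ('Tensão AC abaixo do limite',        'aviso',      'rede_eletrica'),
--     '4159': ('Sobretensão AC',                    'importante', 'rede_eletrica'),
--     '4160': ('Sobrecorrente AC',                  'importante', 'equipamento'),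
-- }
--
-- _PESO_NIVEL = {'info': 0, 'aviso': 1, 'importante': 2, 'critico': 3}
--
-- def interpretar(codigo_raw: str) -> tuple[str, str, str]:
--     """
--     Interpreta o campo `currentFault` da FoxESS.
--
--     `codigo_raw` pode ser:
--       - "" ou None → retorna fallback genérico
--       - "4151" → código único
--       - "4151,4156,4158" → múltiplos códigos (rede caiu e gerou 3 falhas ao mesmo tempo)
--
--     Retorna uma tupla (mensagem, nivel, categoria):
--       - mensagem: descrições humanas concatenadas por " + "
--       - nivel: o mais severo entre os códigos encontrados
--       - categoria: a mais severa entre os códigos encontrados (mesma lógica)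
--
--     Códigos desconhecidos não quebram — viram "Código X (não catalogado)"
--     com nível 'aviso' e categoria 'preventivo'.
--     """
--     if not codigo_raw:
--         return ('Falha reportada pelo inversor', 'critico', 'equipamento')
--
--     codigos = [c.strip() for c in str(codigo_raw).split(',') if c.strip()]
--     if not codigos:
--         return ('Falha reportada pelo inversor', 'critico', 'equipamento')
--
--     descricoes: list[str] = []
--     peso_max = -1
--     nivel_max = 'aviso'
--     categoria_max = 'preventivo'
--
--     for codigo in codigos:
--         if codigo in CATALOGO_Q:
--             desc, nivel, categoria = CATALOGO_Q[codigo]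
--             descricoes.append(f'{desc} (cód. {codigo})')
--         else:
--             desc = f'Código {codigo} (não catalogado)'
--             nivel = 'aviso'
--             categoria = 'preventivo'
--             descricoes.append(desc)
--
--         peso = _PESO_NIVEL.get(nivel, 0)
--         if peso > peso_max:
--             peso_max = peso
--             nivel_max = nivel
--             categoria_max = categoria
--
--     return (' + '.join(descricoes), nivel_max, categoria_max)
-- ===== SOURCE B (Python) =====
-- CATALOGO_Q = {
--     '4029': ('PV1 curto-circuito interno',  'critico',    'equipamento'),
--     '4030': ('PV1 tensão de entrada baixa', 'aviso',      'equipamento'),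
--     '4031': ('PV1 sobretensão',             'aviso',      'equipamento'),
--     '4032': ('PV1 sobrecorrente',           'aviso',      'equipamento'),
--     '4061': ('PV2 curto-circuito interno',  'critico',    'equipamento'),
--     '4062': ('PV2 tensão de entrada baixa', 'aviso',      'equipamento'),
--     '4063': ('PV2 sobretensão',             'aviso',      'equipamento'),
--     '4064': ('PV2 sobrecorrente',           'aviso',      'equipamento'),
--     '4093': ('PV3 curto-circuito interno',  'critico',    'equipamento'),
--     '4094': ('PV3 tensão de entrada baixa', 'aviso',      'equipamento'),
--     '4095': ('PV3 sobretensão',             'aviso',      'equipamento'),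
--     '4096': ('PV3 sobrecorrente',           'aviso',      'equipamento'),
--     '4125': ('PV4 curto-circuito interno',  'critico',    'equipamento'),
--     '4126': ('PV4 tensão de entrada baixa', 'aviso',      'equipamento'),
--     '4127': ('PV4 sobretensão',             'aviso',      'equipamento'),
--     '4128': ('PV4 sobrecorrente',           'aviso',      'equipamento'),
--     '4147': ('Ponte do inversor assimétrica',     'critico',    'equipamento'),
--     '4148': ('Tensão desigual nos polos do relé', 'critico',    'equipamento'),
--     '4149': ('Ride-through de alta/baixa tensão', 'aviso',      'rede_eletrica'),
--     '4150': ('Desligamento remoto',               'importante', 'sistema_desligado'),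
--     '4151': ('Perda de AC (rede ausente)',        'aviso',      'rede_eletrica'),
--     '4152': ('Sobretensão do barramento BUS',     'importante', 'rede_eletrica'),
--     '4153': ('Falha de aterramento (GFDI)',       'critico',    'equipamento'),
--     '4154': ('Temperatura AC baixa',              'aviso',      'equipamento'),
--     '4155': ('Temperatura AC alta',               'importante', 'equipamento'),
--     '4156': ('Frequência AC abaixo do limite',    'aviso',      'rede_eletrica'),
--     '4157': ('Frequência AC acima do limite',     'aviso',      'rede_eletrica'),
--     '4158': ('Tensão AC abaixo do limite',        'aviso',      'rede_eletrica'),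
--     '4159': ('Sobretensão AC',                    'importante', 'rede_eletrica'),
--     '4160': ('Sobrecorrente AC',                  'importante', 'equipamento'),
-- }
--
-- # Níveis em ordem decrescente de severidade; B não usa tabela numérica de pesos.
-- _NIVEIS_DESC = ('critico', 'importante', 'aviso', 'info')
--
--
-- def _resolver(codigo):
--     """Mapeia um código para (descrição formatada, nível, categoria)."""
--     if codigo in CATALOGO_Q:
--         desc, nivel, categoria = CATALOGO_Q[codigo]
--         return (f'{desc} (cód. {codigo})', nivel, categoria)
--     return (f'Código {codigo} (não catalogado)', 'aviso', 'preventivo')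
--
--
-- def _mais_severo(entries):
--     """Primeira entrada do nível mais severo presente: varre os níveis em
--     ordem decrescente e devolve a primeira entrada que casar."""
--     for nivel in _NIVEIS_DESC:
--         for entry in entries:
--             if entry[1] == nivel:
--                 return entry
--     return entries[0]  # inalcançável: todo nível produzido está em _NIVEIS_DESC
--
--
-- def interpretar(codigo_raw):
--     if not codigo_raw:
--         return ('Falha reportada pelo inversor', 'critico', 'equipamento')
--
--     codigos = [c.strip() for c in str(codigo_raw).split(',') if c.strip()]
--     if not codigos:
--         return ('Falha reportada pelo inversor', 'critico', 'equipamento')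
--
--     entries = [_resolver(c) for c in codigos]
--     mensagem = ' + '.join(e[0] for e in entries)
--     _, nivel, categoria = _mais_severo(entries)
--     return (mensagem, nivel, categoria)
-- ===== Notes on version B (the rewrite author's own statement) =====
-- stated objective: alternative
-- what changed: B drops A's numeric weight table and running strict-maximum state entirely: it resolves each code to an entry, joins the descriptions, and selects severity by scanning the levels in fixed descending order ('critico','importante','aviso','info') and returning the first entry matching the highest level present, which coincides with A's first-maximal-weight choice.
import Mathlib
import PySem

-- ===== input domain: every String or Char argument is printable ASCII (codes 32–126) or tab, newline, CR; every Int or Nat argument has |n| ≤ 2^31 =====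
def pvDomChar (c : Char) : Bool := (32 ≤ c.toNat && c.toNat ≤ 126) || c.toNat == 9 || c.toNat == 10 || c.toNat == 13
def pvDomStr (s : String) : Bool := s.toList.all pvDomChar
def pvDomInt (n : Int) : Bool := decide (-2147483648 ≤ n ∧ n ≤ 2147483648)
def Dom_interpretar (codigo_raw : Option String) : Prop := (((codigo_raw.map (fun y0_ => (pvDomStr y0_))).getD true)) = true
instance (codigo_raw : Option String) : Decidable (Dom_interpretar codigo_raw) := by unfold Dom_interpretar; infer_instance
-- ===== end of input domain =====

-- B change (objective: alternative): B drops A's numeric weight table and running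
-- strict-maximum; it resolves entries, joins descriptions, and picks severity by a
-- weight-free scan of the levels in fixed descending order, returning the first entry
-- of the highest level present — the same value as A's first-maximal-weight choice.

-- shared module-level constant CATALOGO_Q from the Python module
def catalogoQ : PySem.Dict String (String × String × String) := PySem.Dict.mk [
  ("4029", ("PV1 curto-circuito interno",  "critico",    "equipamento")),
  ("4030", ("PV1 tensão de entrada baixa", "aviso",      "equipamento")),
  ("4031", ("PV1 sobretensão",             "aviso",      "equipamento")),
  ("4032", ("PV1 sobrecorrente",           "aviso",      "equipamento")),
  ("4061", ("PV2 curto-circuito interno",  "critico",    "equipamento")),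
  ("4062", ("PV2 tensão de entrada baixa", "aviso",      "equipamento")),
  ("4063", ("PV2 sobretensão",             "aviso",      "equipamento")),
  ("4064", ("PV2 sobrecorrente",           "aviso",      "equipamento")),
  ("4093", ("PV3 curto-circuito interno",  "critico",    "equipamento")),
  ("4094", ("PV3 tensão de entrada baixa", "aviso",      "equipamento")),
  ("4095", ("PV3 sobretensão",             "aviso",      "equipamento")),
  ("4096", ("PV3 sobrecorrente",           "aviso",      "equipamento")),
  ("4125", ("PV4 curto-circuito interno",  "critico",    "equipamento")),
  ("4126", ("PV4 tensão de entrada baixa", "aviso",      "equipamento")),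
  ("4127", ("PV4 sobretensão",             "aviso",      "equipamento")),
  ("4128", ("PV4 sobrecorrente",           "aviso",      "equipamento")),
  ("4147", ("Ponte do inversor assimétrica",     "critico",    "equipamento")),
  ("4148", ("Tensão desigual nos polos do relé", "critico",    "equipamento")),
  ("4149", ("Ride-through de alta/baixa tensão", "aviso",      "rede_eletrica")),
  ("4150", ("Desligamento remoto",               "importante", "sistema_desligado")),
  ("4151", ("Perda de AC (rede ausente)",        "aviso",      "rede_eletrica")),
  ("4152", ("Sobretensão do barramento BUS",     "importante", "rede_eletrica")),
  ("4153", ("Falha de aterramento (GFDI)",       "critico",    "equipamento")),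
  ("4154", ("Temperatura AC baixa",              "aviso",      "equipamento")),
  ("4155", ("Temperatura AC alta",               "importante", "equipamento")),
  ("4156", ("Frequência AC abaixo do limite",    "aviso",      "rede_eletrica")),
  ("4157", ("Frequência AC acima do limite",     "aviso",      "rede_eletrica")),
  ("4158", ("Tensão AC abaixo do limite",        "aviso",      "rede_eletrica")),
  ("4159", ("Sobretensão AC",                    "importante", "rede_eletrica")),
  ("4160", ("Sobrecorrente AC",                  "importante", "equipamento"))]

-- ===== PORT A =====
-- A uses the numeric weight table _PESO_NIVEL
def pesoNivel : PySem.Dict String Int :=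
  PySem.Dict.mk [("info", 0), ("aviso", 1), ("importante", 2), ("critico", 3)]

-- one step of A's for-loop; state = (descricoes, peso_max, nivel_max, categoria_max)
def interpretarStepA (st : List String × Int × String × String) (codigo : String) :
    List String × Int × String × String :=
  match st with
  | (ds, pesoMax, nivelMax, categoriaMax) =>
    match catalogoQ.get? codigo with
    | some (desc, nivel, categoria) =>
      let ds := ds ++ [desc ++ " (cód. " ++ codigo ++ ")"]
      let peso := pesoNivel.getD nivel 0
      if peso > pesoMax then (ds, peso, nivel, categoria) else (ds, pesoMax, nivelMax, categoriaMax)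
    | none =>
      let ds := ds ++ ["Código " ++ codigo ++ " (não catalogado)"]
      let peso := pesoNivel.getD "aviso" 0
      if peso > pesoMax then (ds, peso, "aviso", "preventivo")
      else (ds, pesoMax, nivelMax, categoriaMax)

def interpretar (codigo_raw : Option String) : String × String × String :=
  match codigo_raw with
  | none => ("Falha reportada pelo inversor", "critico", "equipamento")
  | some s =>
    if s = "" then ("Falha reportada pelo inversor", "critico", "equipamento")
    else
      let codigos := (((PySem.Str.split? s ",").getD []).map PySem.Str.strip).filter (fun c => c ≠ "")
      if codigos = [] then ("Falha reportada pelo inversor", "critico", "equipamento")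
      else
        let st := codigos.foldl interpretarStepA ([], -1, "aviso", "preventivo")
        (PySem.Str.join " + " st.1, st.2.2.1, st.2.2.2)

-- ===== PORT B =====
-- B's helper _resolver
def resolver (codigo : String) : String × String × String :=
  match catalogoQ.get? codigo with
  | some (desc, nivel, categoria) => (desc ++ " (cód. " ++ codigo ++ ")", nivel, categoria)
  | none => ("Código " ++ codigo ++ " (não catalogado)", "aviso", "preventivo")

-- B's _NIVEIS_DESC: levels in decreasing order of severity (no numeric weights in B)
def niveisDesc : List String := ["critico", "importante", "aviso", "info"]

-- B's _mais_severo: outer loop over levels = findSome?, inner first-match loop = find?;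
-- the final (unreachable in B's calls) 'return entries[0]' is the fallback arm
def maisSevero (entries : List (String × String × String)) : String × String × String :=
  match niveisDesc.findSome? (fun nivel => entries.find? (fun e => e.2.1 = nivel)) with
  | some e => e
  | none => entries.headD ("", "", "")

def interpretar_alt (codigo_raw : Option String) : String × String × String :=
  match codigo_raw with
  | none => ("Falha reportada pelo inversor", "critico", "equipamento")
  | some s =>
    if s = "" then ("Falha reportada pelo inversor", "critico", "equipamento")
    else
      let codigos := (((PySem.Str.split? s ",").getD []).map PySem.Str.strip).filter (fun c => c ≠ "")
      if codigos = [] then ("Falha reportada pelo inversor", "critico", "equipamento")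
      else
        let entries := codigos.map resolver
        let mensagem := PySem.Str.join " + " (entries.map (fun e => e.1))
        let sev := maisSevero entries
        (mensagem, sev.2.1, sev.2.2)

-- ===== PRECONDITION & SPEC =====
def Spec_interpretar (codigo_raw : Option String) (out : String × String × String) : Prop := out = interpretar_alt codigo_raw
instance (codigo_raw : Option String) (out : String × String × String) : Decidable (Spec_interpretar codigo_raw out) := by unfold Spec_interpretar; infer_instance

-- ===== CLAIM (what is proved, stated in full; the proofs are below) =====
def Claim_equal_interpretar : Prop := ∀ (codigo_raw : Option String), Dom_interpretar codigo_raw → Spec_interpretar codigo_raw (interpretar codigo_raw)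

-- ===== LEMMAS AND PROOFS =====

-- weight of an entry, as A computes it
def wgt (e : String × String × String) : Int := pesoNivel.getD e.2.1 0

-- proof-side running first-maximum over entries, carrying (best entry, its weight);
-- mirrors A's (peso_max, nivel_max, categoria_max) update
def maxStep (bk : (String × String × String) × Int) (e : String × String × String) :
    (String × String × String) × Int :=
  if wgt e > bk.2 then (e, wgt e) else bk

-- entries resolver can produce carry one of the three catalogued levels
def Resolved (e : String × String × String) : Prop :=
  e.2.1 = "critico" ∨ e.2.1 = "importante" ∨ e.2.1 = "aviso"

theorem resolver_resolved (c : String) : Resolved (resolver c) := by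
  unfold resolver Resolved
  rcases h : catalogoQ.get? c with _ | ⟨d, n, k⟩
  · simp
  · have hm := PySem.Dict.mem_items_of_get?_eq_some catalogoQ h
    have hall : ∀ p ∈ catalogoQ.items,
        p.2.2.1 = "critico" ∨ p.2.2.1 = "importante" ∨ p.2.2.1 = "aviso" := by decide
    exact hall _ hm

theorem wgt_critico {e : String × String × String} (h : e.2.1 = "critico") : wgt e = 3 := by
  simp [wgt, pesoNivel, PySem.Dict.getD, PySem.Dict.get?_mk_cons, h]
theorem wgt_importante {e : String × String × String} (h : e.2.1 = "importante") : wgt e = 2 := by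
  simp [wgt, pesoNivel, PySem.Dict.getD, PySem.Dict.get?_mk_cons, h]
theorem wgt_aviso {e : String × String × String} (h : e.2.1 = "aviso") : wgt e = 1 := by
  simp [wgt, pesoNivel, PySem.Dict.getD, PySem.Dict.get?_mk_cons, h]

theorem wgt_pos {e : String × String × String} (h : Resolved e) : 0 < wgt e := by
  rcases h with h | h | h
  · rw [wgt_critico h]; omega
  · rw [wgt_importante h]; omega
  · rw [wgt_aviso h]; omega

-- A's loop step, rephrased through B's resolver and maxStep
theorem stepA_eq (st : List String × Int × String × String) (c : String) :
    interpretarStepA st c =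
      (st.1 ++ [(resolver c).1],
        if wgt (resolver c) > st.2.1
        then (wgt (resolver c), (resolver c).2.1, (resolver c).2.2)
        else st.2) := by
  obtain ⟨ds, pm, nm, cm⟩ := st
  unfold interpretarStepA resolver wgt
  rcases h : catalogoQ.get? c with _ | ⟨d, n, k⟩ <;> simp <;> split <;> simp

-- loop invariant: A's fold from (ds, w, n, k) equals descriptions-append plus maxStep fold
theorem fold_invariant (rest : List String) :
    ∀ (ds : List String) (w : Int) (e : String × String × String),
    rest.foldl interpretarStepA (ds, w, e.2.1, e.2.2) =
      (ds ++ (rest.map resolver).map (fun x => x.1),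
        ((rest.map resolver).foldl maxStep (e, w)).2,
        ((rest.map resolver).foldl maxStep (e, w)).1.2) := by
  induction rest with
  | nil => intro ds w e; simp
  | cons c t ih =>
    intro ds w e
    simp only [List.foldl_cons, List.map_cons, stepA_eq, maxStep]
    split
    · rw [ih (ds ++ [(resolver c).1]) (wgt (resolver c)) (resolver c)]
      simp
    · rw [ih (ds ++ [(resolver c).1]) w e]
      simp

-- the level scan B performs
def scan (l : List (String × String × String)) : Option (String × String × String) :=
  niveisDesc.findSome? (fun nivel => l.find? (fun e => e.2.1 = nivel))

-- how scan evaluates on a cons, by the head's level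
theorem scan_cons_crit {e : String × String × String} (h : e.2.1 = "critico")
    (l : List (String × String × String)) : scan (e :: l) = some e := by
  simp [scan, niveisDesc, List.find?_cons, h]

theorem scan_cons_imp {e : String × String × String} (h : e.2.1 = "importante")
    (l : List (String × String × String)) :
    scan (e :: l) = some ((l.find? (fun x => x.2.1 = "critico")).getD e) := by
  cases hc : l.find? (fun x => x.2.1 = "critico") <;>
    simp [scan, niveisDesc, List.find?_cons, h, hc]

theorem scan_cons_aviso {e : String × String × String} (h : e.2.1 = "aviso")
    (l : List (String × String × String)) :
    scan (e :: l) = some (((l.find? (fun x => x.2.1 = "critico")).or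
      (l.find? (fun x => x.2.1 = "importante"))).getD e) := by
  cases hc : l.find? (fun x => x.2.1 = "critico") <;>
    cases hi : l.find? (fun x => x.2.1 = "importante") <;>
      simp [scan, niveisDesc, List.find?_cons, h, hc, hi]

-- dropping a head that is strictly dominated later does not change the scan
theorem scan_skip_lt {e0 e1 : String × String × String}
    (h0 : Resolved e0) (h1 : Resolved e1) (hlt : wgt e0 < wgt e1)
    (es : List (String × String × String)) :
    scan (e0 :: e1 :: es) = scan (e1 :: es) := by
  rcases h0 with k0 | k0 | k0 <;> rcases h1 with k1 | k1 | k1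
  · exact absurd hlt (by rw [wgt_critico k0, wgt_critico k1]; omega)
  · exact absurd hlt (by rw [wgt_critico k0, wgt_importante k1]; omega)
  · exact absurd hlt (by rw [wgt_critico k0, wgt_aviso k1]; omega)
  · rw [scan_cons_imp k0, scan_cons_crit k1]; simp [k1]
  · exact absurd hlt (by rw [wgt_importante k0, wgt_importante k1]; omega)
  · exact absurd hlt (by rw [wgt_importante k0, wgt_aviso k1]; omega)
  · rw [scan_cons_aviso k0, scan_cons_crit k1]; simp [k1]
  · rw [scan_cons_aviso k0, scan_cons_imp k1]
    cases hc : es.find? (fun x => x.2.1 = "critico") <;>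
      simp [k1, hc]
  · exact absurd hlt (by rw [wgt_aviso k0, wgt_aviso k1]; omega)

-- dropping a later element that never beats the head does not change the scan
theorem scan_skip_le {e0 e1 : String × String × String}
    (h0 : Resolved e0) (h1 : Resolved e1) (hle : wgt e1 ≤ wgt e0)
    (es : List (String × String × String)) :
    scan (e0 :: e1 :: es) = scan (e0 :: es) := by
  rcases h0 with k0 | k0 | k0 <;> rcases h1 with k1 | k1 | k1
  · rw [scan_cons_crit k0, scan_cons_crit k0]
  · rw [scan_cons_crit k0, scan_cons_crit k0]
  · rw [scan_cons_crit k0, scan_cons_crit k0]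
  · exact absurd hle (by rw [wgt_critico k1, wgt_importante k0]; omega)
  · rw [scan_cons_imp k0, scan_cons_imp k0]; simp [k1]
  · rw [scan_cons_imp k0, scan_cons_imp k0]; simp [k1]
  · exact absurd hle (by rw [wgt_critico k1, wgt_aviso k0]; omega)
  · exact absurd hle (by rw [wgt_importante k1, wgt_aviso k0]; omega)
  · rw [scan_cons_aviso k0, scan_cons_aviso k0]; simp [k1]

theorem scan_single {e0 : String × String × String} (h0 : Resolved e0) :
    scan (e0 :: []) = some e0 := by
  rcases h0 with k0 | k0 | k0
  · exact scan_cons_crit k0 []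
  · rw [scan_cons_imp k0]; simp
  · rw [scan_cons_aviso k0]; simp

-- main lemma: B's level scan returns exactly the entry A's running maximum keeps
theorem scan_eq_fold (es : List (String × String × String)) :
    ∀ (e0 : String × String × String), Resolved e0 → (∀ e ∈ es, Resolved e) →
    scan (e0 :: es) = some ((es.foldl maxStep (e0, wgt e0)).1) := by
  induction es with
  | nil => intro e0 h0 _; simpa using scan_single h0
  | cons e1 t ih =>
    intro e0 h0 hall
    have h1 : Resolved e1 := hall e1 (by simp)
    have ht : ∀ e ∈ t, Resolved e := fun e he => hall e (by simp [he])
    simp only [List.foldl_cons, maxStep]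
    by_cases hgt : wgt e1 > wgt e0
    · rw [if_pos hgt, scan_skip_lt h0 h1 hgt t]
      exact ih e1 h1 ht
    · rw [if_neg hgt, scan_skip_le h0 h1 (by omega) t]
      exact ih e0 h0 ht

-- ===== VERDICT (by name: the statement is the Claim_ definition above) =====
theorem interpretar_spec : Claim_equal_interpretar := by
  intro codigo_raw _
  unfold Spec_interpretar interpretar interpretar_alt
  cases codigo_raw with
  | none => rfl
  | some s =>
    by_cases hs : s = ""
    · simp [hs]
    · simp only [hs, if_false]
      rcases hc : (((PySem.Str.split? s ",").getD []).map PySem.Str.strip).filter (fun c => c ≠ "") with _ | ⟨c0, rest⟩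
      · simp
      · simp only [List.cons_ne_nil, if_false]
        rw [List.foldl_cons, stepA_eq]
        have h0 : Resolved (resolver c0) := resolver_resolved c0
        have hw : wgt (resolver c0) > -1 := by have := wgt_pos h0; omega
        rw [if_pos hw]
        have hf := fold_invariant rest [(resolver c0).1] (wgt (resolver c0)) (resolver c0)
        have hscan := scan_eq_fold (rest.map resolver) (resolver c0) h0
          (by intro e he; rcases List.mem_map.1 he with ⟨c, _, rfl⟩; exact resolver_resolved c)
        simp only [List.map_cons, maisSevero]
        rw [show niveisDesc.findSome? (fun nivel => (resolver c0 :: rest.map resolver).find? (fun e => e.2.1 = nivel)) = scan (resolver c0 :: rest.map resolver) from rfl, hscan]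
        simp [hf]
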